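-- pv_equiv track=rewrite | github.com/veselotome4e/Programming0 | Week 4/Dictionaries/winter.py | winter_is_coming
-- ===== SOURCE A (Python) =====
-- def winter_is_coming(seasons):
--
--     n = len(seasons)
--    #take the first occurence of winter in season
--     winter = "winter"
--     index = -1
--
--     for i in range(0, n):
--         if seasons[i] == winter:
--             index = i
--             break
--
--     #if the index is still -1, winter is totally missing
--     if index == -1:
--         return False
--
--     #trying to find a sequence of 5 different elements out of summer
--     current_seq = 0
--     needed_seq = 5
--     for i in range(index+1, n):
--         if seasons[i] != winter:
--             current_seq +=1
--             if current_seq == needed_seq: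
--                 return True
--         else:
--             current_seq = 0
--
--     return False
-- ===== SOURCE B (Python) =====
-- def winter_is_coming(seasons):
--     # Collect the indices of every "winter"; if none, the answer is False.
--     winters = [i for i, s in enumerate(seasons) if s == "winter"]
--     if not winters:
--         return False
--     # With len(seasons) as a virtual final boundary, a maximal non-winter run
--     # after the first winter has length gap-1 for some pair of consecutive
--     # boundaries; so the answer is: some consecutive boundary gap >= 6.
--     boundaries = winters + [len(seasons)]
--     return any(b - a >= 6 for a, b in zip(boundaries, boundaries[1:]))
-- ===== Notes on version B (the rewrite author's own statement) =====
-- stated objective: alternative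
-- what changed: B never maintains a resetting run counter: it collects all indices of 'winter' in one comprehension and decides the answer from the gaps between consecutive winter positions (with len(seasons) as a virtual final boundary), returning True iff some gap is >= 6.
import Mathlib
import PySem

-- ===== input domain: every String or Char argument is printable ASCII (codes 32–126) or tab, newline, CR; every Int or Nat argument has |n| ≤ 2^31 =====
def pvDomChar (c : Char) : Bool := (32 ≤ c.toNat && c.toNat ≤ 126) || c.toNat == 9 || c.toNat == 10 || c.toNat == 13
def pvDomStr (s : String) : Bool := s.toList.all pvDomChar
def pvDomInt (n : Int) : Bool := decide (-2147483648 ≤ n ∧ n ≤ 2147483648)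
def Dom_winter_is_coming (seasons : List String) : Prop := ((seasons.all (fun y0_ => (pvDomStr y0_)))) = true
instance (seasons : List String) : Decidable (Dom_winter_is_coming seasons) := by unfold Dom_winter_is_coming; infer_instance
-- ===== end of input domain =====

-- B drops A's resetting run counter entirely: it collects all "winter" indices and
-- decides the answer from gaps between consecutive winter positions (alternative).

-- ===== PORT A =====
-- first loop of A: scan indices i in range(0, n), break at the first "winter", else index stays -1
def winterFirstA (seasons : List String) : List Int → Int
  | [] => -1
  | i :: rest =>
    if (PySem.List.pyGet? seasons i).getD "" = "winter" then i
    else winterFirstA seasons rest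

-- second loop of A: resetting counter, early return at 5
def winterSeqA (seasons : List String) : Int → List Int → Bool
  | _, [] => false
  | cur, i :: rest =>
    if (PySem.List.pyGet? seasons i).getD "" ≠ "winter" then
      (if cur + 1 = 5 then true else winterSeqA seasons (cur + 1) rest)
    else winterSeqA seasons 0 rest

def winter_is_coming (seasons : List String) : Bool :=
  let n : Int := seasons.length
  let index := winterFirstA seasons (PySem.List.pyRange 0 n)
  if index = -1 then false
  else winterSeqA seasons 0 (PySem.List.pyRange (index + 1) n)

-- ===== PORT B =====
def winter_is_coming_alt (seasons : List String) : Bool :=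
  let winters := ((PySem.List.enumerate seasons 0).filter (fun p => p.2 == "winter")).map (fun p => p.1)
  if winters.isEmpty then false
  else
    let boundaries := winters ++ [(seasons.length : Int)]
    (boundaries.zip boundaries.tail).any (fun p => decide (6 ≤ p.2 - p.1))

-- ===== PRECONDITION & SPEC =====
def Spec_winter_is_coming (seasons : List String) (out : Bool) : Prop := out = winter_is_coming_alt seasons
instance (seasons : List String) (out : Bool) : Decidable (Spec_winter_is_coming seasons out) := by unfold Spec_winter_is_coming; infer_instance

-- ===== CLAIM (what is proved, stated in full; the proofs are below) =====
def Claim_equal_winter_is_coming : Prop := ∀ (seasons : List String), Dom_winter_is_coming seasons → Spec_winter_is_coming seasons (winter_is_coming seasons)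

-- ===== LEMMAS AND PROOFS =====

-- pure-list version of A's second loop (indices replaced by the suffix itself)
def winterSeqP : Int → List String → Bool
  | _, [] => false
  | cur, s :: rest =>
    if s ≠ "winter" then
      (if cur + 1 = 5 then true else winterSeqP (cur + 1) rest)
    else winterSeqP 0 rest

-- positions of "winter", counted from base (pure form of B's comprehension)
def idxW (base : Int) : List String → List Int
  | [] => []
  | s :: rest => if s = "winter" then base :: idxW (base + 1) rest else idxW (base + 1) rest

-- any consecutive gap ≥ 6 (pure form of B's zip/any)
def gapsAny (l : List Int) : Bool := (l.zip l.tail).any (fun p => decide (6 ≤ p.2 - p.1))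

lemma gapsAny_cons (a b : Int) (l : List Int) :
    gapsAny (a :: b :: l) = ((decide (6 ≤ b - a)) || gapsAny (b :: l)) := by
  simp [gapsAny]

-- A's first loop over range(k, n) computes k + index?(drop k) (or -1)
lemma winterFirstA_range (seasons : List String) (k : Nat) :
    winterFirstA seasons (PySem.List.pyRange k seasons.length) =
      (match PySem.List.index? (seasons.drop k) "winter" with
       | none => -1
       | some j => (k : Int) + j) := by
  induction hn : seasons.length - k generalizing k with
  | zero =>
    have hk : seasons.length ≤ k := by omega
    rw [PySem.List.pyRange_one_eq_nil (by exact_mod_cast hk)]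
    rw [List.drop_eq_nil_of_le hk]
    simp [winterFirstA, PySem.List.index?]
  | succ m ih =>
    have hk : k < seasons.length := by omega
    rw [PySem.List.pyRange_one_cons (by exact_mod_cast hk)]
    have hdrop : seasons.drop k = seasons[k] :: seasons.drop (k + 1) :=
      List.drop_eq_getElem_cons hk
    rw [hdrop]
    simp only [winterFirstA, PySem.List.pyGet?_natCast, List.getElem?_eq_getElem hk,
      Option.getD_some]
    by_cases hw : seasons[k] = "winter"
    · rw [if_pos hw, hw, PySem.List.index?_cons_self]; simp
    · rw [if_neg hw, PySem.List.index?_cons_of_ne _ hw]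
      have : (k : Int) + 1 = ((k + 1 : Nat) : Int) := by omega
      rw [this, ih (k + 1) (by omega)]
      cases PySem.List.index? (seasons.drop (k + 1)) "winter" with
      | none => simp
      | some j => simp; ring

-- A's second loop over range(k, n) is the pure loop on the suffix
lemma winterSeqA_range (seasons : List String) (k : Nat) (cur : Int) :
    winterSeqA seasons cur (PySem.List.pyRange k seasons.length) =
      winterSeqP cur (seasons.drop k) := by
  induction hn : seasons.length - k generalizing k cur with
  | zero =>
    have hk : seasons.length ≤ k := by omega
    rw [PySem.List.pyRange_one_eq_nil (by exact_mod_cast hk)]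
    rw [List.drop_eq_nil_of_le hk]
    simp [winterSeqA, winterSeqP]
  | succ m ih =>
    have hk : k < seasons.length := by omega
    rw [PySem.List.pyRange_one_cons (by exact_mod_cast hk)]
    rw [List.drop_eq_getElem_cons hk]
    simp only [winterSeqA, winterSeqP, PySem.List.pyGet?_natCast,
      List.getElem?_eq_getElem hk, Option.getD_some]
    by_cases hw : seasons[k] = "winter"
    · simp only [hw, ne_eq, not_true_eq_false, if_false]
      exact ih k.succ 0 (by omega)
    · simp only [ne_eq, hw, not_false_eq_true, if_pos]
      by_cases h5 : cur + 1 = 5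
      · simp [h5]
      · simp only [if_neg h5]
        exact ih k.succ (cur + 1) (by omega)

-- B's comprehension computes idxW
lemma enum_filter_eq_idxW (l : List String) (s : Int) :
    (((PySem.List.enumerate l s).filter (fun p => p.2 == "winter")).map (fun p => p.1)) =
      idxW s l := by
  induction l generalizing s with
  | nil => simp [PySem.List.enumerate_nil, idxW]
  | cons x rest ih =>
    rw [PySem.List.enumerate_cons]
    by_cases hw : x = "winter"
    · simp [idxW, hw, ih]
    · simp [idxW, hw, ih]

-- idxW decomposed by the first occurrence of "winter"
lemma idxW_index? (l : List String) (base : Int) :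
    idxW base l =
      (match PySem.List.index? l "winter" with
       | none => []
       | some j => (base + j) :: idxW (base + j + 1) (l.drop (j + 1))) := by
  induction l generalizing base with
  | nil => simp [idxW, PySem.List.index?]
  | cons x rest ih =>
    by_cases hw : x = "winter"
    · rw [hw, PySem.List.index?_cons_self]
      simp [idxW]
    · rw [PySem.List.index?_cons_of_ne _ hw]
      simp only [idxW, if_neg hw, ih (base + 1)]
      cases PySem.List.index? rest "winter" with
      | none => simp
      | some j =>
        simp only [Option.map_some]
        have h1 : base + 1 + (j : Int) = base + ((j + 1 : Nat) : Int) := by push_cast; ring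
        have h2 : base + 1 + (j : Int) + 1 = base + ((j + 1 : Nat) : Int) + 1 := by push_cast; ring
        rw [h2, h1, List.drop_succ_cons]

-- every position idxW produces is ≥ base
lemma idxW_head_ge (l : List String) (base h : Int) (t : List Int)
    (he : idxW base l = h :: t) : base ≤ h := by
  induction l generalizing base with
  | nil => simp [idxW] at he
  | cons x rest ih =>
    by_cases hw : x = "winter"
    · simp [idxW, hw] at he; omega
    · simp only [idxW, if_neg hw] at he
      have := ih (base + 1) he
      omega

-- the resetting counter equals the gap test, with prev = base - cur - 1 the last boundary
lemma winterSeqP_eq_gaps (tail : List String) (base prev cur : Int)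
    (h0 : 0 ≤ cur) (h5 : cur < 5) (hp : prev = base - cur - 1) :
    winterSeqP cur tail =
      gapsAny (prev :: (idxW base tail ++ [base + tail.length])) := by
  induction tail generalizing base prev cur with
  | nil =>
    simp [winterSeqP, idxW, gapsAny]
    omega
  | cons s rest ih =>
    by_cases hw : s = "winter"
    · simp only [winterSeqP, idxW, if_pos hw, List.cons_append, gapsAny_cons]
      rw [if_neg (show ¬(s ≠ "winter") by simp [hw])]
      have hfalse : decide (6 ≤ base - prev) = false := by simp; omega
      rw [hfalse, Bool.false_or]
      have hlen : base + ((s :: rest).length : Int) = (base + 1) + (rest.length : Int) := by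
        push_cast [List.length_cons]; ring
      rw [hlen]
      exact ih (base + 1) base 0 (by omega) (by omega) (by omega)
    · simp only [winterSeqP, idxW, if_neg hw]
      rw [if_pos (show s ≠ "winter" from hw)]
      have hlen : base + ((s :: rest).length : Int) = (base + 1) + (rest.length : Int) := by
        push_cast [List.length_cons]; ring
      rw [hlen]
      by_cases hc : cur + 1 = 5
      · rw [if_pos hc]
        -- the next boundary is ≥ base + 1, so the first gap is already ≥ 6
        cases he : idxW (base + 1) rest with
        | nil =>
          simp only [List.nil_append, gapsAny_cons]
          have : decide (6 ≤ base + 1 + (rest.length : Int) - prev) = true := by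
            simp; omega
          simp [this]
        | cons h t =>
          have hh := idxW_head_ge rest (base + 1) h t he
          simp only [List.cons_append, gapsAny_cons]
          have : decide (6 ≤ h - prev) = true := by simp; omega
          simp [this]
      · rw [if_neg hc]
        exact ih (base + 1) prev (cur + 1) (by omega) (by omega) (by omega)

-- ===== VERDICT (by name: the statement is the Claim_ definition above) =====
theorem winter_is_coming_spec : Claim_equal_winter_is_coming := by
  intro seasons _
  unfold Spec_winter_is_coming winter_is_coming winter_is_coming_alt
  dsimp only
  rw [enum_filter_eq_idxW, idxW_index? seasons 0]
  have hfirst := winterFirstA_range seasons 0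
  simp only [Nat.cast_zero, List.drop_zero] at hfirst
  rw [hfirst]
  cases hidx : PySem.List.index? seasons "winter" with
  | none => simp
  | some j =>
    obtain ⟨hj, -, -⟩ := PySem.List.getElem_of_index?_eq_some hidx
    simp only [zero_add]
    have hne : ¬ ((j : Int) = -1) := by omega
    rw [if_neg hne]
    rw [if_neg (by simp)]
    have hcast : (j : Int) + 1 = ((j + 1 : Nat) : Int) := by push_cast; ring
    rw [hcast, winterSeqA_range seasons (j + 1) 0]
    have hlen : (seasons.length : Int) = ((j : Int) + 1) + ((seasons.drop (j + 1)).length : Int) := by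
      simp [List.length_drop]; omega
    have := winterSeqP_eq_gaps (seasons.drop (j + 1)) ((j : Int) + 1) (j : Int) 0
      (by omega) (by omega) (by omega)
    rw [this, hlen]
    simp [gapsAny]
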